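-- pv_equiv track=rewrite | github.com/lucasflores/dev-stack | src/dev_stack/rules/pipeline_warn.py | _parse_trailers
-- ===== SOURCE A (Python) =====
-- def _parse_trailers(body_lines: list[str]) -> dict[str, str]:
--     """Parse git-trailer-style key: value pairs from body lines."""
--     trailers: dict[str, str] = {}
--     for line in reversed(body_lines):
--         stripped = line.strip()
--         if not stripped:
--             break
--         if ": " in stripped:
--             key, _, value = stripped.partition(": ")
--             trailers[key.strip()] = value.strip()
--         else:
--             break
--     return trailers
-- ===== SOURCE B (Python) =====
-- def _parse_trailers(body_lines: list[str]) -> dict[str, str]: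
--     """Parse git-trailer-style key: value pairs from body lines."""
--     # Phase 1: scan indices backward to find where the trailing trailer block starts.
--     start = len(body_lines)
--     while start > 0:
--         s = body_lines[start - 1].strip()
--         if not s or ": " not in s:
--             break
--         start -= 1
--     # Phase 2: build the dict in one comprehension over the block, bottom-up
--     # (later = topmost overwrites, keeping first-insertion position, as A does).
--     pairs = (line.strip().partition(": ") for line in reversed(body_lines[start:]))
--     return {k.strip(): v.strip() for k, _, v in pairs}
-- ===== Notes on version B (the rewrite author's own statement) =====
-- stated objective: alternative
-- what changed: A's single reverse loop with in-loop breaks and dict mutation is split into two phases: a backward index scan that computes the start of the trailing trailer block, then a dict comprehension over the reversed slice that parses it.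
import Mathlib
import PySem

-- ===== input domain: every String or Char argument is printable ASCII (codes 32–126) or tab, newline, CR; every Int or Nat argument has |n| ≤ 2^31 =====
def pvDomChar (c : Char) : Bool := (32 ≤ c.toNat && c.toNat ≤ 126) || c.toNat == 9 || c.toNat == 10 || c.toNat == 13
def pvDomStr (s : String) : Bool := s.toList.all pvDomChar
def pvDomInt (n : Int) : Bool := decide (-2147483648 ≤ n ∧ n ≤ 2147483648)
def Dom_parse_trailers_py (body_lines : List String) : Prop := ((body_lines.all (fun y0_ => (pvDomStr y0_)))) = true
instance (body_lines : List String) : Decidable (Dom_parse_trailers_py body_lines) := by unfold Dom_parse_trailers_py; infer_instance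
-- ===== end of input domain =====

-- B replaces A's single reverse loop (breaks + dict mutation inside) by two phases: a
-- backward index scan finding the start of the trailer block, then a dict comprehension
-- over the reversed slice; same cost, different decomposition (objective: alternative).

-- shared exact port of Python's s.partition(sep) for nonempty sep (key, sep-if-found, rest)
def pyPartition (s sep : String) : String × String × String :=
  let i := PySem.Str.find s sep
  if i = -1 then (s, "", "")
  else (String.ofList (s.toList.take i.toNat), sep, String.ofList (s.toList.drop (i.toNat + sep.length)))

-- ===== PORT A =====
def parseLoopA : List String → PySem.Dict String String → PySem.Dict String String
  | [], d => d
  | line :: rest, d =>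
    if PySem.Str.strip line = "" then d
    else if PySem.Str.isIn ": " (PySem.Str.strip line) then
      parseLoopA rest
        (d.insert (PySem.Str.strip (pyPartition (PySem.Str.strip line) ": ").1)
                  (PySem.Str.strip (pyPartition (PySem.Str.strip line) ": ").2.2))
    else d

def parse_trailers_py (body_lines : List String) : List (String × String) :=
  (parseLoopA body_lines.reverse PySem.Dict.empty).items

-- ===== PORT B =====
-- the while loop of Source B, recursing on `start` (body_lines[start-1] is in range, so getD is exact)
def findStartB (body : List String) : Nat → Nat
  | 0 => 0
  | Nat.succ k =>
    if PySem.Str.strip (body.getD k "") = "" ∨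
       PySem.Str.isIn ": " (PySem.Str.strip (body.getD k "")) = false then k + 1
    else findStartB body k

def parse_trailers_py_alt (body_lines : List String) : List (String × String) :=
  ((PySem.List.slice body_lines (some ((findStartB body_lines body_lines.length : Nat) : Int)) none).reverse.foldl
    (fun d line =>
      d.insert (PySem.Str.strip (pyPartition (PySem.Str.strip line) ": ").1)
               (PySem.Str.strip (pyPartition (PySem.Str.strip line) ": ").2.2))
    PySem.Dict.empty).items

-- ===== PRECONDITION & SPEC =====
def Spec_parse_trailers_py (body_lines : List String) (out : List (String × String)) : Prop := out = parse_trailers_py_alt body_lines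
instance (body_lines : List String) (out : List (String × String)) : Decidable (Spec_parse_trailers_py body_lines out) := by unfold Spec_parse_trailers_py; infer_instance

-- ===== CLAIM (what is proved, stated in full; the proofs are below) =====
def Claim_equal_parse_trailers_py : Prop := ∀ (body_lines : List String), Dom_parse_trailers_py body_lines → Spec_parse_trailers_py body_lines (parse_trailers_py body_lines)

-- ===== LEMMAS AND PROOFS =====

def goodB (line : String) : Bool :=
  !(PySem.Str.strip line == "") && PySem.Str.isIn ": " (PySem.Str.strip line)

def insB (d : PySem.Dict String String) (line : String) : PySem.Dict String String :=
  d.insert (PySem.Str.strip (pyPartition (PySem.Str.strip line) ": ").1)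
           (PySem.Str.strip (pyPartition (PySem.Str.strip line) ": ").2.2)

theorem goodB_true {line : String} (h1 : ¬ PySem.Str.strip line = "")
    (h2 : PySem.Str.isIn ": " (PySem.Str.strip line) = true) : goodB line = true := by
  simp only [goodB, Bool.and_eq_true, Bool.not_eq_eq_eq_not, Bool.not_true]
  constructor
  · simpa using h1
  · exact h2

theorem goodB_false {line : String}
    (h : PySem.Str.strip line = "" ∨ PySem.Str.isIn ": " (PySem.Str.strip line) = false) :
    goodB line = false := by
  rcases h with h | h
  · simp [goodB, h]
  · simp only [goodB, Bool.and_eq_false_iff]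
    exact Or.inr h

theorem parseLoopA_eq_foldl (l : List String) (d : PySem.Dict String String) :
    parseLoopA l d = (l.takeWhile goodB).foldl insB d := by
  induction l generalizing d with
  | nil => rfl
  | cons line rest ih =>
    rw [List.takeWhile_cons]
    by_cases h1 : PySem.Str.strip line = ""
    · rw [parseLoopA, if_pos h1, goodB_false (Or.inl h1)]
      rfl
    · by_cases h2 : PySem.Str.isIn ": " (PySem.Str.strip line) = true
      · rw [parseLoopA, if_neg h1, if_pos h2, goodB_true h1 h2, if_pos rfl,
            List.foldl_cons, ih]
        rfl
      · rw [parseLoopA, if_neg h1, if_neg h2,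
            goodB_false (Or.inr (Bool.eq_false_iff.mpr h2))]
        rfl

theorem findStartB_le (body : List String) (k : Nat) : findStartB body k ≤ k := by
  induction k with
  | zero => exact le_rfl
  | succ n ih =>
    rw [findStartB]
    split
    · exact le_rfl
    · omega

theorem findStartB_append (ys : List String) (x : String) (k : Nat) (hk : k ≤ ys.length) :
    findStartB (ys ++ [x]) k = findStartB ys k := by
  induction k with
  | zero => rfl
  | succ n ih =>
    have hget : (ys ++ [x]).getD n "" = ys.getD n "" := by
      simp [List.getD, List.getElem?_append_left (by omega : n < ys.length)]
    rw [findStartB, findStartB, hget]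
    split
    · rfl
    · exact ih (by omega)

theorem drop_findStartB (body : List String) :
    body.drop (findStartB body body.length) = (body.reverse.takeWhile goodB).reverse := by
  induction body using List.reverseRecOn with
  | nil => rfl
  | append_singleton ys x ih =>
    have hlen : (ys ++ [x]).length = ys.length + 1 := by simp
    have hget : (ys ++ [x]).getD ys.length "" = x := by simp [List.getD]
    rw [hlen, List.reverse_append, List.reverse_singleton, List.singleton_append,
        List.takeWhile_cons]
    by_cases hg : goodB x = true
    · have h1 : ¬(PySem.Str.strip x = "" ∨ PySem.Str.isIn ": " (PySem.Str.strip x) = false) := by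
        intro h
        rw [goodB_false h] at hg
        exact Bool.false_ne_true hg
      rw [findStartB, hget, if_neg h1, findStartB_append ys x ys.length le_rfl,
          List.drop_append_of_le_length (findStartB_le ys ys.length), ih, hg, if_pos rfl,
          List.reverse_cons]
    · have hgf : goodB x = false := Bool.eq_false_iff.mpr hg
      have h1 : PySem.Str.strip x = "" ∨ PySem.Str.isIn ": " (PySem.Str.strip x) = false := by
        have := hgf
        simp only [goodB, Bool.and_eq_false_iff, Bool.not_eq_false'] at this
        rcases this with h | h
        · exact Or.inl (by simpa using h)
        · exact Or.inr h
      rw [findStartB, hget, if_pos h1, hgf,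
          List.drop_eq_nil_of_le (by simp)]
      simp

theorem slice_from_eq (body : List String) (k : Nat) :
    PySem.List.slice body (some (k : Int)) none = body.drop k := by
  simp [pysem]

-- ===== VERDICT (by name: the statement is the Claim_ definition above) =====
theorem parse_trailers_py_spec : Claim_equal_parse_trailers_py := by
  intro body_lines _
  unfold Spec_parse_trailers_py parse_trailers_py parse_trailers_py_alt
  rw [parseLoopA_eq_foldl, slice_from_eq, drop_findStartB, List.reverse_reverse]
  rfl
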